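-- pv_equiv track=rewrite | github.com/ashwinkd/ADReSSo2021 | ADReSSo20/get_recall.py | get_consecutive
-- ===== SOURCE A (Python) =====
-- def get_consecutive(tags):
--     result = []
--     i = 0
--     while i < len(tags):
--         if tags[i] != "E":
--             i += 1
--             continue
--         error_word = (i, i + 1)
--         i2 = i + 1
--         while i2 < len(tags):
--             if tags[i2] != "E":
--                 break
--             error_word = (i, i2 + 1)
--             i2 += 1
--         result.append(error_word)
--         i = i2
--
--     return result
-- ===== SOURCE B (Python) =====
-- def get_consecutive(tags):
--     # Phase 1: run-length-encode the tag list.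
--     runs = []
--     for t in tags:
--         if runs and runs[-1][0] == t:
--             runs[-1] = (t, runs[-1][1] + 1)
--         else:
--             runs.append((t, 1))
--     # Phase 2: emit a span for each run of "E", tracking positions by prefix sums.
--     result = []
--     pos = 0
--     for key, n in runs:
--         if key == "E":
--             result.append((pos, pos + n))
--         pos += n
--     return result
-- ===== Notes on version B (the rewrite author's own statement) =====
-- stated objective: idiomatic
-- what changed: Replaces the nested index-resume while loops with a two-phase pass: run-length-encode the tag list, then emit (pos, pos+n) spans for runs keyed 'E' using a running prefix-sum position.
import Mathlib
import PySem

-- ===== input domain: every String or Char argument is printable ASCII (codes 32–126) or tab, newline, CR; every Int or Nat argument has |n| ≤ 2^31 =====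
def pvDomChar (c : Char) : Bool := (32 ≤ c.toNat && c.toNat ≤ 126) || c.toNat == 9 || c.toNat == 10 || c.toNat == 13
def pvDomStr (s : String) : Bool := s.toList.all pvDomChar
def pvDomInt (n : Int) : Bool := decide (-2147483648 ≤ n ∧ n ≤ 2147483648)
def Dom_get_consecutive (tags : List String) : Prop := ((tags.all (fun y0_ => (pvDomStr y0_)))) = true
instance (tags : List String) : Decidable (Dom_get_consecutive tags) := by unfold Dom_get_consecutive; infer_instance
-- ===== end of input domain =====

-- B re-implements the index-resume scan as run-length encoding followed by a
-- prefix-sum emission pass (idiomatic decomposition; same asymptotic cost).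

-- ===== PORT A =====
-- inner while loop of A: scans i2 forward while tags[i2] == "E", updating error_word;
-- returns (error_word, i2).
def pvInnerA (tags : List String) (i : Nat) (i2 : Nat) (ew : Int × Int) : (Int × Int) × Nat :=
  if h : i2 < tags.length then
    if tags[i2] ≠ "E" then (ew, i2)
    else pvInnerA tags i (i2 + 1) ((i : Int), (i2 : Int) + 1)
  else (ew, i2)
termination_by tags.length - i2

-- the outer loop needs this to terminate (i advances to i2 ≥ i+1)
theorem pvInnerA_snd_ge (tags : List String) (i i2 : Nat) (ew : Int × Int) :
    i2 ≤ (pvInnerA tags i i2 ew).2 := by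
  fun_induction pvInnerA tags i i2 ew with
  | case1 => simp
  | case2 _ _ _ _ ih => omega
  | case3 => simp

-- outer while loop of A, carrying result
def pvOuterA (tags : List String) (i : Nat) (result : List (Int × Int)) : List (Int × Int) :=
  if h : i < tags.length then
    if tags[i] ≠ "E" then pvOuterA tags (i + 1) result
    else
      let p := pvInnerA tags i (i + 1) ((i : Int), (i : Int) + 1)
      pvOuterA tags p.2 (result ++ [p.1])
  else result
termination_by tags.length - i
decreasing_by
  · omega
  · have := pvInnerA_snd_ge tags i (i + 1) ((i : Int), (i : Int) + 1)
    omega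

def get_consecutive (tags : List String) : List (Int × Int) :=
  pvOuterA tags 0 []

-- ===== PORT B =====
-- one step of B's first for loop: extend the last run or start a new one
def pvStepRun (runs : List (String × Nat)) (t : String) : List (String × Nat) :=
  match runs.getLast? with
  | some kn => if kn.1 = t then runs.dropLast ++ [(t, kn.2 + 1)] else runs ++ [(t, 1)]
  | none => [(t, 1)]

-- one step of B's second for loop: emit a span for an "E" run, advance pos
def pvStepEmit (st : List (Int × Int) × Int) (kn : String × Nat) : List (Int × Int) × Int :=
  ((if kn.1 = "E" then st.1 ++ [(st.2, st.2 + (kn.2 : Int))] else st.1), st.2 + (kn.2 : Int))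

def get_consecutive_alt (tags : List String) : List (Int × Int) :=
  let runs := tags.foldl pvStepRun []
  ((runs.foldl pvStepEmit ([], 0)).1)

-- ===== PRECONDITION & SPEC =====
def Spec_get_consecutive (tags : List String) (out : List (Int × Int)) : Prop := out = get_consecutive_alt tags
instance (tags : List String) (out : List (Int × Int)) : Decidable (Spec_get_consecutive tags out) := by unfold Spec_get_consecutive; infer_instance

-- ===== CLAIM (what is proved, stated in full; the proofs are below) =====
def Claim_equal_get_consecutive : Prop := ∀ (tags : List String), Dom_get_consecutive tags → Spec_get_consecutive tags (get_consecutive tags)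

-- ===== LEMMAS AND PROOFS =====

-- common reference: spans of maximal "E"-runs, structurally
def pvS : List String → Int → List (Int × Int)
  | [], _ => []
  | t :: rest, pos =>
    if t = "E" then
      (pos, pos + 1 + ((rest.takeWhile (· = "E")).length : Int)) ::
        pvS (rest.drop (rest.takeWhile (· = "E")).length)
            (pos + 1 + ((rest.takeWhile (· = "E")).length : Int))
    else pvS rest (pos + 1)
termination_by l _ => l.length
decreasing_by
  · simp only [List.length_drop, List.length_cons]; omega
  · simp

-- run-length encoding, structurally (front merge)
def pvMerge (p : String × Nat) : List (String × Nat) → List (String × Nat)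
  | [] => [p]
  | (k, n) :: rs => if p.1 = k then (k, p.2 + n) :: rs else p :: (k, n) :: rs

def pvRle : List String → List (String × Nat)
  | [] => []
  | t :: rest => pvMerge (t, 1) (pvRle rest)

-- spans from a run list
def pvG : List (String × Nat) → Int → List (Int × Int)
  | [], _ => []
  | (k, n) :: rs, pos => (if k = "E" then [(pos, pos + (n : Int))] else []) ++ pvG rs (pos + (n : Int))

-- ---- A-side ----

theorem pvInnerA_eq (tags : List String) (i : Nat) :
    ∀ n i2, tags.length - i2 ≤ n →
      pvInnerA tags i i2 ((i : Int), (i2 : Int)) =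
      (((i : Int), ((i2 + ((tags.drop i2).takeWhile (· = "E")).length : Nat) : Int)),
        i2 + ((tags.drop i2).takeWhile (· = "E")).length) := by
  intro n
  induction n with
  | zero =>
    intro i2 hle
    have hge : ¬ i2 < tags.length := by omega
    have hd : tags.drop i2 = [] := by rw [List.drop_eq_nil_iff]; omega
    rw [pvInnerA, dif_neg hge]
    simp [hd]
  | succ n ih =>
    intro i2 hle
    rw [pvInnerA]
    by_cases h2 : i2 < tags.length
    · rw [dif_pos h2]
      rw [List.drop_eq_getElem_cons h2]
      by_cases he : tags[i2] = "E"
      · rw [if_neg (by simp [he])]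
        have hc : ((i : Int), (i2 : Int) + 1) = ((i : Int), ((i2 + 1 : Nat) : Int)) := by
          push_cast; ring_nf
        rw [hc, ih (i2 + 1) (by omega)]
        simp only [List.takeWhile, he, decide_true, List.length_cons]
        refine Prod.ext (Prod.ext rfl ?_) (by omega)
        simp only
        push_cast; ring
      · rw [if_pos (by simp [he])]
        simp [List.takeWhile, he]
    · have hd : tags.drop i2 = [] := by rw [List.drop_eq_nil_iff]; omega
      rw [dif_neg h2]
      simp [hd]

theorem pvOuterA_eq (tags : List String) :
    ∀ n i acc, tags.length - i ≤ n →
      pvOuterA tags i acc = acc ++ pvS (tags.drop i) (i : Int) := by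
  intro n
  induction n with
  | zero =>
    intro i acc hle
    have hge : ¬ i < tags.length := by omega
    have hd : tags.drop i = [] := by rw [List.drop_eq_nil_iff]; omega
    rw [pvOuterA, dif_neg hge]
    simp [hd, pvS]
  | succ n ih =>
    intro i acc hle
    rw [pvOuterA]
    by_cases h2 : i < tags.length
    · rw [dif_pos h2]
      rw [List.drop_eq_getElem_cons h2]
      by_cases he : tags[i] = "E"
      · rw [if_neg (by simp [he])]
        have hc : ((i : Int), (i : Int) + 1) = ((i : Int), ((i + 1 : Nat) : Int)) := by
          push_cast; ring_nf
        simp only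
        rw [hc, pvInnerA_eq tags i (tags.length - (i + 1)) (i + 1) (le_refl _)]
        set k := ((tags.drop (i + 1)).takeWhile (· = "E")).length with hk
        rw [ih (i + 1 + k) (acc ++ [((i : Int), ((i + 1 + k : Nat) : Int))]) (by omega)]
        rw [pvS]
        rw [if_pos he]
        rw [List.drop_drop, ← hk]
        have hcast : ((i + 1 + k : Nat) : Int) = (i : Int) + 1 + (k : Int) := by push_cast; ring
        rw [hcast]
        simp
      · rw [if_pos (by simp [he])]
        rw [ih (i + 1) acc (by omega), pvS, if_neg he]
        have hcast : ((i + 1 : Nat) : Int) = (i : Int) + 1 := by push_cast; ring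
        rw [hcast]
    · have hd : tags.drop i = [] := by rw [List.drop_eq_nil_iff]; omega
      rw [dif_neg h2]
      simp [hd, pvS]

-- ---- B-side ----

theorem pvMerge_cons (t : String) (c : Nat) (R : List (String × Nat)) :
    ∃ m rs, pvMerge (t, c) R = (t, m) :: rs := by
  cases R with
  | nil => exact ⟨c, [], rfl⟩
  | cons p rs =>
    obtain ⟨k, n⟩ := p
    by_cases h : t = k
    · subst h; exact ⟨c + n, rs, by simp [pvMerge]⟩
    · exact ⟨c, (k, n) :: rs, by simp [pvMerge, h]⟩

theorem pvMerge_merge_same (k : String) (n : Nat) (R : List (String × Nat)) :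
    pvMerge (k, n) (pvMerge (k, 1) R) = pvMerge (k, n + 1) R := by
  cases R with
  | nil => simp [pvMerge]
  | cons p rs =>
    obtain ⟨k', m⟩ := p
    by_cases h : k = k'
    · subst h
      simp [pvMerge, Nat.add_assoc]
    · simp [pvMerge, h]

theorem pvFoldl_stepRun (l : List String) :
    ∀ pre k n, List.foldl pvStepRun (pre ++ [(k, n)]) l = pre ++ pvMerge (k, n) (pvRle l) := by
  induction l with
  | nil => intro pre k n; simp [pvRle, pvMerge]
  | cons t l' ih =>
    intro pre k n
    rw [List.foldl_cons]
    have hlast : (pre ++ [(k, n)]).getLast? = some (k, n) := by simp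
    have hdl : (pre ++ [(k, n)]).dropLast = pre := by simp
    by_cases h : k = t
    · subst h
      have hstep : pvStepRun (pre ++ [(k, n)]) k = pre ++ [(k, n + 1)] := by
        simp [pvStepRun, hlast, hdl]
      rw [hstep, ih]
      rw [pvRle, pvMerge_merge_same]
    · have hstep : pvStepRun (pre ++ [(k, n)]) t = (pre ++ [(k, n)]) ++ [(t, 1)] := by
        simp [pvStepRun, hlast, h]
      rw [hstep, ih]
      obtain ⟨m, rs, hm⟩ := pvMerge_cons t 1 (pvRle l')
      rw [pvRle, hm]
      simp [pvMerge, h]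

theorem pvFoldl_stepRun_nil (l : List String) :
    List.foldl pvStepRun [] l = pvRle l := by
  cases l with
  | nil => rfl
  | cons t l' =>
    rw [List.foldl_cons]
    have : pvStepRun [] t = [] ++ [(t, 1)] := by simp [pvStepRun]
    rw [this, pvFoldl_stepRun l' [] t 1]
    simp [pvRle]

theorem pvRle_cons (rest : List String) :
    ∀ t, pvRle (t :: rest) =
      (t, 1 + (rest.takeWhile (· = t)).length) :: pvRle (rest.drop (rest.takeWhile (· = t)).length) := by
  induction rest with
  | nil => intro t; simp [pvRle, pvMerge]
  | cons u rest' ih =>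
    intro t
    by_cases h : u = t
    · subst h
      have h1 : pvRle (u :: u :: rest') = pvMerge (u, 1) (pvRle (u :: rest')) := rfl
      rw [h1, ih u]
      simp [List.takeWhile, pvMerge, Nat.add_comm]
      rw [Nat.add_comm, List.drop_succ_cons]
    · have h1 : pvRle (t :: u :: rest') = pvMerge (t, 1) (pvRle (u :: rest')) := rfl
      rw [h1, ih u]
      have hd : decide (u = t) = false := by simp [h]
      have h' : ¬ t = u := fun hh => h hh.symm
      simp [List.takeWhile, hd, pvMerge, h']
      exact (ih u).symm

-- skipping a prefix of non-"E" tags only advances the position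
theorem pvS_skip (p : List String) (hne : ∀ x ∈ p, x ≠ "E") :
    ∀ rest pos, pvS (p ++ rest) pos = pvS rest (pos + p.length) := by
  induction p with
  | nil => intro rest pos; simp
  | cons x p' ih =>
    intro rest pos
    have hx : x ≠ "E" := hne x (by simp)
    rw [List.cons_append, pvS, if_neg hx]
    rw [ih (fun y hy => hne y (by simp [hy])) rest (pos + 1)]
    congr 1
    simp only [List.length_cons]
    push_cast; ring

theorem pvDropWhile_eq_drop (p : String → Bool) (l : List String) :
    l.dropWhile p = l.drop (l.takeWhile p).length := by
  induction l with
  | nil => rfl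
  | cons x l' ih =>
    by_cases h : p x
    · simp [List.dropWhile, List.takeWhile, h, ih]
    · simp [List.dropWhile, List.takeWhile, h]

theorem pvG_rle (l : List String) : ∀ pos, pvG (pvRle l) pos = pvS l pos := by
  induction hn : l.length using Nat.strong_induction_on generalizing l with
  | _ n ih =>
  cases l with
  | nil => intro pos; simp [pvRle, pvG, pvS]
  | cons t rest =>
    intro pos
    rw [pvRle_cons rest t]
    set c := (rest.takeWhile (· = t)).length with hc
    have hrec : ∀ pos', pvG (pvRle (rest.drop c)) pos' = pvS (rest.drop c) pos' := by
      intro pos'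
      apply ih (rest.drop c).length ?_ _ rfl
      simp only [List.length_cons] at hn
      have : c ≤ rest.length := by
        rw [hc]; exact List.Sublist.length_le (List.takeWhile_sublist _)
      simp only [List.length_drop]
      omega
    by_cases h : t = "E"
    · subst h
      rw [pvG, if_pos rfl, hrec, pvS, if_pos rfl, ← hc]
      rw [show pos + ((1 + c : Nat) : Int) = pos + 1 + (c : Int) from by push_cast; ring]
      simp
    · rw [pvG, if_neg h, hrec, pvS, if_neg h, List.nil_append]
      have hsplit : rest = rest.takeWhile (· = t) ++ rest.drop c := by
        rw [hc, ← pvDropWhile_eq_drop]; exact (List.takeWhile_append_dropWhile).symm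
      have hne : ∀ x ∈ rest.takeWhile (· = t), x ≠ "E" := by
        intro x hx
        have := List.mem_takeWhile_imp hx
        simp only [decide_eq_true_eq] at this
        rw [this]; exact h
      conv_rhs => rw [hsplit, pvS_skip _ hne]
      rw [← hc]
      congr 1
      push_cast; ring

theorem pvFoldl_emit (runs : List (String × Nat)) :
    ∀ acc pos, (runs.foldl pvStepEmit (acc, pos)).1 = acc ++ pvG runs pos := by
  induction runs with
  | nil => intro acc pos; simp [pvG]
  | cons p rs ih =>
    intro acc pos
    obtain ⟨k, n⟩ := p
    rw [List.foldl_cons]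
    by_cases h : k = "E"
    · subst h
      have : pvStepEmit (acc, pos) ("E", n) = (acc ++ [(pos, pos + (n : Int))], pos + (n : Int)) := by
        simp [pvStepEmit]
      rw [this, ih, pvG]
      simp
    · have : pvStepEmit (acc, pos) (k, n) = (acc, pos + (n : Int)) := by
        simp [pvStepEmit, h]
      rw [this, ih, pvG]
      simp [h]

-- ===== VERDICT (by name: the statement is the Claim_ definition above) =====
theorem get_consecutive_spec : Claim_equal_get_consecutive := by
  intro tags _
  unfold Spec_get_consecutive get_consecutive get_consecutive_alt
  rw [pvOuterA_eq tags tags.length 0 [] (by omega)]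
  rw [pvFoldl_stepRun_nil, pvFoldl_emit, pvG_rle]
  simp
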